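-- pv_equiv track=rewrite | github.com/wonjangcloud9/open-guardrail | python/open_guardrail/guards/hallucination_url.py | _has_repeated_segments
-- ===== SOURCE A (Python) =====
-- def _has_repeated_segments(path: str) -> bool:
--     parts = [p for p in path.split("/") if p]
--     if len(parts) < 2:
--         return False
--     seen: set[str] = set()
--     repeats = 0
--     for part in parts:
--         if part in seen:
--             repeats += 1
--         seen.add(part)
--     return repeats >= 2
-- ===== SOURCE B (Python) =====
-- def _has_repeated_segments(path: str) -> bool:
--     parts = sorted(p for p in path.split("/") if p)
--     dup_pairs = sum(1 for x, y in zip(parts, parts[1:]) if x == y)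
--     return dup_pairs >= 2
-- ===== Notes on version B (the rewrite author's own statement) =====
-- stated objective: alternative
-- what changed: Sorts the non-empty path segments and counts adjacent equal pairs in one linear scan of the sorted list (each group of k equal segments yields k-1 adjacent pairs, exactly A's repeat count), replacing A's seen-set membership loop with a sort-then-adjacent-scan and dropping the len<2 guard (unreachable threshold there).
import Mathlib
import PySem

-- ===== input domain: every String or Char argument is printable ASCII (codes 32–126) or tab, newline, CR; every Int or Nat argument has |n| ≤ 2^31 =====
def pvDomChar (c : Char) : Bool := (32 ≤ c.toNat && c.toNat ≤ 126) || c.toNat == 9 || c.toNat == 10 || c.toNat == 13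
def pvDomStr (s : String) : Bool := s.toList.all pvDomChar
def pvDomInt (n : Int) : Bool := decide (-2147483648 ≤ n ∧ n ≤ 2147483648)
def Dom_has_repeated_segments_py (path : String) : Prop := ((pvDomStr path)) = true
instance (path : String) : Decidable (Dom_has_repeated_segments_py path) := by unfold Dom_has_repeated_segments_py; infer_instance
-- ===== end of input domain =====

-- B sorts the non-empty segments and counts adjacent equal pairs instead of A's seen-set loop.

-- ===== PORT A =====
def has_repeated_segments_py (path : String) : Bool :=
  let parts := ((PySem.Str.split? path "/").getD []).filter (fun p => p ≠ "")
  if parts.length < 2 then false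
  else
    let st := parts.foldl
      (fun (s : PySem.Set String × Int) part =>
        (PySem.Set.add s.1 part, if PySem.Set.contains s.1 part then s.2 + 1 else s.2))
      (PySem.Set.empty, 0)
    decide (st.2 ≥ 2)

-- ===== PORT B =====
def has_repeated_segments_py_alt (path : String) : Bool :=
  let parts := PySem.List.sorted (((PySem.Str.split? path "/").getD []).filter (fun p => p ≠ "")) (fun x => x) false
  let dup_pairs := ((parts.zip parts.tail).filter (fun xy => xy.1 == xy.2)).length
  decide ((dup_pairs : Int) ≥ 2)

-- ===== PRECONDITION & SPEC =====
def Spec_has_repeated_segments_py (path : String) (out : Bool) : Prop := out = has_repeated_segments_py_alt path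
instance (path : String) (out : Bool) : Decidable (Spec_has_repeated_segments_py path out) := by unfold Spec_has_repeated_segments_py; infer_instance

-- ===== CLAIM (what is proved, stated in full; the proofs are below) =====
def Claim_equal_has_repeated_segments_py : Prop := ∀ (path : String), Dom_has_repeated_segments_py path → Spec_has_repeated_segments_py path (has_repeated_segments_py path)

-- ===== LEMMAS AND PROOFS =====

-- ===== VERDICT (by name: the statement is the Claim_ definition above) =====
-- A's loop invariant: the final counter is r plus (elements consumed) minus (new distinct elements added to seen).
theorem pv_loop_counts (l : List String) : ∀ (seen : PySem.Set String) (r : Int),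
    (l.foldl
      (fun (s : PySem.Set String × Int) part =>
        (PySem.Set.add s.1 part, if PySem.Set.contains s.1 part then s.2 + 1 else s.2))
      (seen, r)).2
    = r + (l.length : Int) - (((PySem.Set.update seen l).length : Int) - (seen.length : Int)) := by
  induction l with
  | nil => intro seen r; simp [PySem.Set.update]
  | cons a l ih =>
    intro seen r
    have hupd : PySem.Set.update seen (a :: l) = PySem.Set.update (PySem.Set.add seen a) l := rfl
    simp only [List.foldl_cons, ih, hupd, List.length_cons]
    by_cases h : a ∈ seen
    · simp [PySem.Set.add, h]; ring
    · simp [PySem.Set.add, h]; ring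

-- set(l) has as many elements as l has distinct values.
theorem pv_ofList_length (l : List String) :
    (PySem.Set.ofList l).length = l.toFinset.card := by
  have h1 : (PySem.Set.ofList l).toFinset.card = (PySem.Set.ofList l).length :=
    List.toFinset_card_of_nodup (PySem.Set.nodup_ofList l)
  have h2 : (PySem.Set.ofList l).toFinset = l.toFinset := by
    ext x; simp [PySem.Set.mem_ofList]
  rw [← h1, h2]

-- In a (≤)-sorted list, adjacent-equal pairs count the duplicates: pairs + distinct = length.
theorem pv_adj_sorted (l : List String) (h : l.Pairwise (· ≤ ·)) :
    ((l.zip l.tail).filter (fun xy => xy.1 == xy.2)).length + l.toFinset.card = l.length := by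
  induction l with
  | nil => simp
  | cons a t ih =>
    rcases List.pairwise_cons.mp h with ⟨ha, ht⟩
    cases t with
    | nil => simp
    | cons b u =>
      have hmem : a ∈ b :: u ↔ a = b := by
        constructor
        · intro hm
          rcases List.mem_cons.mp hm with h1 | h2
          · exact h1
          · have hb : b ≤ a := (List.pairwise_cons.mp ht).1 a h2
            exact le_antisymm (ha b (List.mem_cons_self)) hb
        · intro he; rw [he]; exact List.mem_cons_self
      have ihr := ih ht
      by_cases hab : a = b
      · have hamem : a ∈ b :: u := hmem.mpr hab
        simp only [List.zip_cons_cons, List.tail_cons, List.filter_cons,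
          List.toFinset_cons, List.length_cons] at *
        rw [Finset.insert_eq_self.mpr (by simpa using hamem)]
        simp only [hab, beq_self_eq_true, if_pos, List.length_cons]
        omega
      · have hanmem : a ∉ b :: u := fun hm => hab (hmem.mp hm)
        simp only [List.zip_cons_cons, List.tail_cons, List.filter_cons,
          List.toFinset_cons, List.length_cons] at *
        rw [Finset.card_insert_of_notMem (by simpa using hanmem)]
        have : (a == b) = false := beq_false_of_ne hab
        simp only [this, if_neg, Bool.false_eq_true, not_false_iff]
        omega

-- ===== VERDICT (by name: the statement is the Claim_ definition above) =====
theorem has_repeated_segments_py_spec : Claim_equal_has_repeated_segments_py := by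
  intro path _
  unfold Spec_has_repeated_segments_py has_repeated_segments_py has_repeated_segments_py_alt
  set parts := ((PySem.Str.split? path "/").getD []).filter (fun p => p ≠ "") with hp
  simp only
  set sp := PySem.List.sorted parts (fun x => x) false with hsp
  have hperm : sp.Perm parts := PySem.List.sorted_perm parts (fun x => x) false
  have hlen : sp.length = parts.length := hperm.length_eq
  have hfin : sp.toFinset = parts.toFinset := List.toFinset_eq_of_perm _ _ hperm
  have hadj := pv_adj_sorted sp (by simpa using PySem.List.sorted_pairwise parts (fun x => x))
  by_cases hl : parts.length < 2
  · rw [if_pos hl]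
    have hz : ((sp.zip sp.tail).filter (fun xy => xy.1 == xy.2)).length ≤ 1 := by
      have h1 : ((sp.zip sp.tail).filter (fun xy => xy.1 == xy.2)).length ≤ (sp.zip sp.tail).length :=
        List.length_filter_le _ _
      have h2 : (sp.zip sp.tail).length ≤ sp.tail.length := by
        simp [List.length_zip]
      have h3 : sp.tail.length ≤ 1 := by
        simp [List.length_tail, hlen]; omega
      omega
    symm
    simp only [decide_eq_false_iff_not]
    omega
  · rw [if_neg hl]
    rw [pv_loop_counts]
    have hcard : (PySem.Set.ofList parts).length = parts.toFinset.card := pv_ofList_length parts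
    have hcardle : parts.toFinset.card ≤ parts.length := parts.toFinset_card_le
    have hupd : PySem.Set.update PySem.Set.empty parts = PySem.Set.ofList parts := rfl
    rw [hupd]
    rw [hfin, hlen] at hadj
    simp only [decide_eq_decide, PySem.Set.empty, List.length_nil]
    rw [hcard]
    push_cast
    omega
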